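-- pv_equiv track=rewrite | github.com/MrBrantCode/unitest_baseline | mut_generate/mist_train_cf/cf_46256/solution.py | find_closest_vowel_subsequence
-- ===== SOURCE A (Python) =====
-- def find_closest_vowel_subsequence(word):
--     vowels = 'aeiouAEIOU'
--     result = ""
--     vowel_flag = False
--     for letter in reversed(word):
--         if letter in vowels:
--             result = letter + result
--             vowel_flag = True
--         elif vowel_flag:
--             break
--     if len(result) == len(word) or len(result) == 1:
--         return ""
--     else:
--         return result
-- ===== SOURCE B (Python) =====
-- def find_closest_vowel_subsequence(word):
--     vowels = 'aeiouAEIOU'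
--     runs = []
--     cur = ''
--     for ch in word:
--         if ch in vowels:
--             cur += ch
--         elif cur:
--             runs.append(cur)
--             cur = ''
--     if cur:
--         runs.append(cur)
--     result = runs[-1] if runs else ''
--     if len(result) == len(word) or len(result) == 1:
--         return ''
--     return result
-- ===== Notes on version B (the rewrite author's own statement) =====
-- stated objective: alternative
-- what changed: Replaces the reverse scan with an early-exit flag by a single forward pass that collects every maximal vowel run and then selects the last run, applying the same length guards.
import Mathlib
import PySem

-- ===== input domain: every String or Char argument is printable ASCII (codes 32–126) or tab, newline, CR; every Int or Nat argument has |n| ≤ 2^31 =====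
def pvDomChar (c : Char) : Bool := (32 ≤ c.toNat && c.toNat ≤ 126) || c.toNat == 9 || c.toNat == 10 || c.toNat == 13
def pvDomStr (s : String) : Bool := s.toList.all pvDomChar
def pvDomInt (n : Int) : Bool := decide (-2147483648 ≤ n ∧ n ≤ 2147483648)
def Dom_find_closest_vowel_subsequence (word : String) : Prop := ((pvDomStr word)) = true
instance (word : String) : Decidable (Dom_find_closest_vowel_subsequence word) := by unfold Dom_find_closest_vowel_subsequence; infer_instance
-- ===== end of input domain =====

-- B replaces A's reverse scan with an early-exit flag by a forward pass collecting all
-- maximal vowel runs and selecting the last one (alternative decomposition, same cost).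


-- shared by both ports: 'letter in "aeiouAEIOU"' for a single character
def pvVowel (c : Char) : Bool := "aeiouAEIOU".toList.contains c

-- ===== PORT A =====
-- the for-loop over reversed(word): state (result, vowel_flag); 'break' = return result
def pvLoopA : List Char → List Char → Bool → List Char
  | [], result, _ => result
  | c :: rest, result, flag =>
    if pvVowel c then pvLoopA rest (c :: result) true
    else if flag then result else pvLoopA rest result flag

def find_closest_vowel_subsequence (word : String) : String :=
  let cs := word.toList
  let result := pvLoopA cs.reverse [] false
  if result.length = cs.length ∨ result.length = 1 then "" else String.ofList result

-- ===== PORT B =====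
-- forward pass: accumulate the current vowel run 'cur', close it on a consonant
def pvRunsB : List Char → List Char → List (List Char)
  | [], cur => if cur = [] then [] else [cur]
  | c :: rest, cur =>
    if pvVowel c then pvRunsB rest (cur ++ [c])
    else if cur = [] then pvRunsB rest [] else cur :: pvRunsB rest []

def find_closest_vowel_subsequence_alt (word : String) : String :=
  let cs := word.toList
  let runs := pvRunsB cs []
  let result := runs.getLastD []      -- runs[-1] if runs else ''
  if result.length = cs.length ∨ result.length = 1 then "" else String.ofList result

-- ===== PRECONDITION & SPEC =====
def Spec_find_closest_vowel_subsequence (word : String) (out : String) : Prop := out = find_closest_vowel_subsequence_alt word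
instance (word : String) (out : String) : Decidable (Spec_find_closest_vowel_subsequence word out) := by unfold Spec_find_closest_vowel_subsequence; infer_instance

-- ===== CLAIM (what is proved, stated in full; the proofs are below) =====
def Claim_equal_find_closest_vowel_subsequence : Prop := ∀ (word : String), Dom_find_closest_vowel_subsequence word → Spec_find_closest_vowel_subsequence word (find_closest_vowel_subsequence word)

-- ===== LEMMAS AND PROOFS =====

-- common reference: the last maximal vowel run of cur ++ l (cur a run in progress)
def pvLast : List Char → List Char → List Char
  | [], cur => cur
  | c :: rest, cur =>
    if pvVowel c then pvLast rest (cur ++ [c])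
    else if rest.any pvVowel then pvLast rest [] else cur

theorem pvLoopA_true (rs acc) : pvLoopA rs acc true = (rs.takeWhile pvVowel).reverse ++ acc := by
  induction rs generalizing acc with
  | nil => simp [pvLoopA]
  | cons c rest ih =>
    by_cases h : pvVowel c <;> simp [pvLoopA, h, ih]

theorem pvTakeWhile_mid {p : Char → Bool} {d : Char} (hd : ¬ p d) (xs ys : List Char) :
    (xs ++ d :: ys).takeWhile p = xs.takeWhile p := by
  induction xs with
  | nil => simp [hd]
  | cons x xs ih =>
    by_cases h : p x <;> simp [h, ih]

theorem pvLast_concat_cons {c : Char} (hc : ¬ pvVowel c) (l cur : List Char) :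
    pvLast (l ++ [c]) cur = pvLast l cur := by
  induction l generalizing cur with
  | nil => simp [pvLast, hc]
  | cons d l ih =>
    by_cases h : pvVowel d
    · simp [pvLast, h, ih]
    · have e1 : pvLast (d :: (l ++ [c])) cur
          = if (l ++ [c]).any pvVowel then pvLast (l ++ [c]) [] else cur := by
        simp [pvLast, h]
      have e2 : pvLast (d :: l) cur
          = if l.any pvVowel then pvLast l [] else cur := by
        simp [pvLast, h]
      rw [List.cons_append, e1, e2]
      simp [List.any_append, hc, ih]

theorem pvLast_concat_vowel {c : Char} (hv : pvVowel c) (l cur : List Char)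
    (hall : cur.all pvVowel) :
    pvLast (l ++ [c]) cur = ((cur ++ l).reverse.takeWhile pvVowel).reverse ++ [c] := by
  induction l generalizing cur with
  | nil =>
    have : cur.reverse.takeWhile pvVowel = cur.reverse := by
      rw [List.takeWhile_eq_self_iff]
      intro x hx; exact List.all_eq_true.mp hall x (List.mem_reverse.mp hx)
    simp [pvLast, hv, this]
  | cons d l ih =>
    by_cases h : pvVowel d
    · have := ih (cur ++ [d]) (by simp_all)
      simpa [pvLast, h, List.append_assoc] using this
    · have hany : (l ++ [c]).any pvVowel = true := by simp [hv]
      have e1 : pvLast (d :: (l ++ [c])) cur = pvLast (l ++ [c]) [] := by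
        simp [pvLast, h, hany]
      rw [List.cons_append, e1, ih [] (by simp)]
      have e2 : (cur ++ d :: l).reverse = l.reverse ++ d :: cur.reverse := by simp
      rw [e2, pvTakeWhile_mid (by simpa using h)]
      simp

theorem pvA_eq_pvLast (l : List Char) : pvLoopA l.reverse [] false = pvLast l [] := by
  induction l using List.reverseRecOn with
  | nil => simp [pvLoopA, pvLast]
  | append_singleton l c ih =>
    by_cases h : pvVowel c
    · rw [List.reverse_append]
      simp only [List.reverse_singleton, List.singleton_append, pvLoopA, h]
      rw [pvLoopA_true, pvLast_concat_vowel h l [] (by simp)]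
      simp
    · rw [List.reverse_append]
      simp only [List.reverse_singleton, List.singleton_append, pvLoopA, h]
      simpa [h, pvLast_concat_cons h l ([] : List Char)] using ih

theorem pvRunsB_ne_nil (l : List Char) {cur : List Char} (h : cur ≠ []) : pvRunsB l cur ≠ [] := by
  induction l generalizing cur with
  | nil => simp [pvRunsB, h]
  | cons c rest ih =>
    by_cases hv : pvVowel c
    · simpa [pvRunsB, hv] using ih (by simp)
    · simp [pvRunsB, hv, h]

theorem pvRunsB_ne_nil_of_vowel (l : List Char) (cur : List Char)
    (h : l.any pvVowel = true) : pvRunsB l cur ≠ [] := by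
  induction l generalizing cur with
  | nil => simp at h
  | cons c rest ih =>
    by_cases hv : pvVowel c
    · simpa [pvRunsB, hv] using pvRunsB_ne_nil rest (by simp)
    · have h' : rest.any pvVowel = true := by simpa [hv] using h
      by_cases hc : cur = [] <;> simp [pvRunsB, hv, hc, ih _ h']

theorem pvRunsB_nil_of_no_vowel (l : List Char) (h : l.any pvVowel = false) :
    pvRunsB l [] = [] := by
  induction l with
  | nil => simp [pvRunsB]
  | cons c rest ih =>
    simp only [List.any_cons, Bool.or_eq_false_iff] at h
    simp [pvRunsB, h.1, ih h.2]

theorem pvLast_no_vowel (l cur : List Char) (h : l.any pvVowel = false) :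
    pvLast l cur = cur := by
  induction l generalizing cur with
  | nil => simp [pvLast]
  | cons c rest ih =>
    simp only [List.any_cons, Bool.or_eq_false_iff] at h
    simp [pvLast, h.1, h.2]


theorem pvB_last (l cur : List Char) : (pvRunsB l cur).getLastD cur = pvLast l cur := by
  induction l generalizing cur with
  | nil => by_cases h : cur = [] <;> simp [pvRunsB, pvLast, h]
  | cons c rest ih =>
    by_cases hv : pvVowel c
    · have e1 : pvRunsB (c :: rest) cur = pvRunsB rest (cur ++ [c]) := by simp [pvRunsB, hv]
      have e2 : pvLast (c :: rest) cur = pvLast rest (cur ++ [c]) := by simp [pvLast, hv]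
      have hne : pvRunsB rest (cur ++ [c]) ≠ [] := pvRunsB_ne_nil rest (by simp)
      obtain ⟨a, ha⟩ := Option.ne_none_iff_exists'.mp (mt List.getLast?_eq_none_iff.mp hne)
      rw [e1, e2, List.getLastD_eq_getLast?, ha, ← ih (cur ++ [c]),
        List.getLastD_eq_getLast?, ha]
      rfl
    · by_cases hc : cur = []
      · subst hc
        have e1 : pvRunsB (c :: rest) [] = pvRunsB rest [] := by simp [pvRunsB, hv]
        have e2 : pvLast (c :: rest) ([] : List Char)
            = if rest.any pvVowel then pvLast rest [] else [] := by simp [pvLast, hv]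
        rw [e1, e2, ih]
        by_cases hr : rest.any pvVowel
        · simp [hr]
        · simp [hr, pvLast_no_vowel rest [] (by simpa using hr)]
      · by_cases hr : rest.any pvVowel
        · have hne : pvRunsB rest [] ≠ [] := pvRunsB_ne_nil_of_vowel rest [] hr
          obtain ⟨a, ha⟩ := Option.ne_none_iff_exists'.mp (mt List.getLast?_eq_none_iff.mp hne)
          have e1 : pvRunsB (c :: rest) cur = cur :: pvRunsB rest [] := by
            simp [pvRunsB, hv, hc]
          have e2 : pvLast (c :: rest) cur = pvLast rest [] := by simp [pvLast, hv, hr]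
          rw [e1, e2, List.getLastD_cons, List.getLastD_eq_getLast?, ha,
            ← ih ([] : List Char), List.getLastD_eq_getLast?, ha]
          rfl
        · have hnil : pvRunsB rest [] = [] :=
            pvRunsB_nil_of_no_vowel rest (by simpa using hr)
          have e1 : pvRunsB (c :: rest) cur = [cur] := by simp [pvRunsB, hv, hc, hnil]
          have e2 : pvLast (c :: rest) cur = cur := by simp [pvLast, hv, hr]
          rw [e1, e2]
          simp

-- ===== VERDICT (by name: the statement is the Claim_ definition above) =====
theorem find_closest_vowel_subsequence_spec : Claim_equal_find_closest_vowel_subsequence := by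
  intro word _
  unfold Spec_find_closest_vowel_subsequence
  unfold find_closest_vowel_subsequence find_closest_vowel_subsequence_alt
  simp only [pvA_eq_pvLast, ← pvB_last]
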